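-- pv_equiv track=rewrite | github.com/cam4ani/PhD-AnimalWelfare | UTILS - Copie.py | stats_chaoticmvt
-- ===== SOURCE A (Python) =====
-- def stats_chaoticmvt(li):
--     li = [i for i in li if i[0]!=None]
--     dico_z_lidur = {}
--     for z,d in li:
--         t = 'chaoticmvt_Middle'+str(z)
--         if t not in dico_z_lidur:
--             dico_z_lidur[t] = []
--         dico_z_lidur[t].append(d)
--     return dico_z_lidur
-- ===== SOURCE B (Python) =====
-- def stats_chaoticmvt(li):
--     pairs = [(z, d) for z, d in li if z != None]
--     keys = []
--     seen = set()
--     for z, _ in pairs: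
--         t = 'chaoticmvt_Middle' + str(z)
--         if t not in seen:
--             seen.add(t)
--             keys.append(t)
--     return {t: [d for z, d in pairs if 'chaoticmvt_Middle' + str(z) == t] for t in keys}
-- ===== Notes on version B (the rewrite author's own statement) =====
-- stated objective: alternative
-- what changed: Replaces on-the-fly dict grouping (create-empty-then-append per element) by a two-phase plan: first an ordered dedup pass collecting the distinct keys, then one per-key filter pass building each value list, assembled in a dict comprehension.
import Mathlib
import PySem

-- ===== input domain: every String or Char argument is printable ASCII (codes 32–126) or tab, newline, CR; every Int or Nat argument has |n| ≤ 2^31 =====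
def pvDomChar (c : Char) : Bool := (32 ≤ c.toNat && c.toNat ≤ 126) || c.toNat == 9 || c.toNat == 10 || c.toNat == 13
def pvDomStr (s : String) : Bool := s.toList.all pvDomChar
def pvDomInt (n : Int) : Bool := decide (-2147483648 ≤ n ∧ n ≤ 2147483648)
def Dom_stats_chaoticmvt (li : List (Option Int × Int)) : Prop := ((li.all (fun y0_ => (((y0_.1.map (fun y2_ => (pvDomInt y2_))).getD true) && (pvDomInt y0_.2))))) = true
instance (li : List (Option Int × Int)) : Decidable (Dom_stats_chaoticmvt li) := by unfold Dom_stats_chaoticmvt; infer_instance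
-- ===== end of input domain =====

-- B groups by a two-phase plan (ordered key dedup, then one filter pass per key) instead of A's
-- on-the-fly dict grouping; same return value (a dict, rendered as its items list) on every input.

-- ===== PORT A =====
def stats_chaoticmvt (li : List (Option Int × Int)) : List (String × List Int) :=
  -- li = [i for i in li if i[0]!=None]; then: dico_z_lidur = {};
  -- for z,d in li: t = 'chaoticmvt_Middle'+str(z); if t not in dico: dico[t]=[]; dico[t].append(d)
  ((li.filter (fun i => i.1 != none)).foldl (fun dico p =>
      match p with
      | (some z, d) =>
          let t := "chaoticmvt_Middle" ++ PySem.Int.toStr z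
          let dico := if dico.contains t then dico else dico.insert t ([] : List Int)
          dico.modify t [] (fun l => l ++ [d])
      | (none, _) => dico)  -- unreachable: filtered out
    (PySem.Dict.empty : PySem.Dict String (List Int))).items

-- ===== PORT B =====
def stats_chaoticmvt_alt (li : List (Option Int × Int)) : List (String × List Int) :=
  -- pairs = [(z, d) for z, d in li if z != None]
  let pairs : List (Int × Int) := li.filterMap (fun p => p.1.map (fun z => (z, p.2)))
  -- keys = []; seen = set(); for z,_ in pairs: t = ...; if t not in seen: seen.add(t); keys.append(t)
  let keys : List String := PySem.Set.ofList (pairs.map (fun q => "chaoticmvt_Middle" ++ PySem.Int.toStr q.1))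
  -- {t: [d for z, d in pairs if 'chaoticmvt_Middle'+str(z) == t] for t in keys}
  keys.map (fun t =>
    (t, (pairs.filter (fun q => ("chaoticmvt_Middle" ++ PySem.Int.toStr q.1) == t)).map (fun q => q.2)))

-- ===== PRECONDITION & SPEC =====
def Spec_stats_chaoticmvt (li : List (Option Int × Int)) (out : List (String × List Int)) : Prop := out = stats_chaoticmvt_alt li
instance (li : List (Option Int × Int)) (out : List (String × List Int)) : Decidable (Spec_stats_chaoticmvt li out) := by unfold Spec_stats_chaoticmvt; infer_instance

-- ===== CLAIM (what is proved, stated in full; the proofs are below) =====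
def Claim_equal_stats_chaoticmvt : Prop := ∀ (li : List (Option Int × Int)), Dom_stats_chaoticmvt li → Spec_stats_chaoticmvt li (stats_chaoticmvt li)

-- ===== LEMMAS AND PROOFS =====

-- the key string of a zone
def pvKey (z : Int) : String := "chaoticmvt_Middle" ++ PySem.Int.toStr z

-- the keyed pairs both ports effectively group
def pvKP (li : List (Option Int × Int)) : List (String × Int) :=
  li.filterMap (fun p => p.1.map (fun z => (pvKey z, p.2)))

-- A's per-element step (if-absent-insert-[] then append) is exactly a modify with default []
theorem pv_step_eq (d : PySem.Dict String (List Int)) (t : String) (x : Int) :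
    (if d.contains t then d else d.insert t ([] : List Int)).modify t [] (fun l => l ++ [x])
      = d.modify t [] (fun l => l ++ [x]) := by
  by_cases h : d.contains t
  · simp [h]
  · have hc : d.contains t = false := by simpa using h
    simp only [PySem.Dict.modify, hc, Bool.false_eq_true, if_false,
      PySem.Dict.getD_insert_self, PySem.Dict.insert_insert_self,
      PySem.Dict.getD_of_not_contains d [] hc]

-- A's filtered fold equals the plain modify-fold over the keyed pairs
theorem pv_fold_eq (li : List (Option Int × Int)) (d : PySem.Dict String (List Int)) :
    ((li.filter (fun i => i.1 != none)).foldl (fun dico p =>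
        match p with
        | (some z, x) =>
            let t := "chaoticmvt_Middle" ++ PySem.Int.toStr z
            let dico := if dico.contains t then dico else dico.insert t ([] : List Int)
            dico.modify t [] (fun l => l ++ [x])
        | (none, _) => dico) d)
      = (pvKP li).foldl (fun d q => d.modify q.1 [] (fun l => l ++ [q.2])) d := by
  induction li generalizing d with
  | nil => rfl
  | cons p rest ih =>
    obtain ⟨z?, x⟩ := p
    cases z? with
    | none => simpa [pvKP, List.filterMap_cons] using ih d
    | some z =>
      simp only [pvKP, List.filterMap_cons, Option.map_some, List.filter_cons]
      simpa [List.foldl_cons, pv_step_eq, pvKey] using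
        ih (d.modify (pvKey z) [] (fun l => l ++ [x]))

-- A computes the canonical grouping of the keyed pairs
theorem pv_A_char (li : List (Option Int × Int)) :
    stats_chaoticmvt li
      = (PySem.Set.ofList ((pvKP li).map (fun q => q.1))).map
          (fun t => (t, ((pvKP li).filter (fun q => q.1 == t)).map (fun q => q.2))) := by
  unfold stats_chaoticmvt
  rw [pv_fold_eq]
  have hnd : ((pvKP li).foldl (fun d q => d.modify q.1 [] (fun l => l ++ [q.2]))
      (PySem.Dict.empty : PySem.Dict String (List Int))).keys.Nodup := by
    exact PySem.Dict.nodup_keys_foldl_modify_key (pvKP li) (fun q => q.1) []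
      (fun _ q l => l ++ [q.2]) _ (by simp [PySem.Dict.keys_empty])
  rw [PySem.Dict.items_eq_map_keys _ hnd []]
  rw [PySem.Dict.keys_foldl_modify_key (pvKP li) (fun q => q.1) [] (fun _ q l => l ++ [q.2])]
  simp only [PySem.Dict.keys_empty]
  rw [show PySem.Set.update ([] : List String) ((pvKP li).map (fun q => q.1))
        = PySem.Set.ofList ((pvKP li).map (fun q => q.1)) from
      PySem.Set.update_empty _]
  refine List.map_congr_left (fun t _ => ?_)
  rw [PySem.Dict.getD_foldl_modify_append]
  simp [PySem.Dict.getD_empty]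

-- B computes the same canonical grouping
theorem pv_B_char (li : List (Option Int × Int)) :
    stats_chaoticmvt_alt li
      = (PySem.Set.ofList ((pvKP li).map (fun q => q.1))).map
          (fun t => (t, ((pvKP li).filter (fun q => q.1 == t)).map (fun q => q.2))) := by
  unfold stats_chaoticmvt_alt
  have hkp : pvKP li
      = (li.filterMap (fun p => p.1.map (fun z => (z, p.2)))).map
          (fun q => (pvKey q.1, q.2)) := by
    rw [List.map_filterMap]
    simp [pvKP, Option.map_map, Function.comp_def]
  rw [hkp]
  simp [List.map_map, List.filter_map, Function.comp_def, pvKey]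

-- ===== VERDICT (by name: the statement is the Claim_ definition above) =====
theorem stats_chaoticmvt_spec : Claim_equal_stats_chaoticmvt := by
  intro li _
  unfold Spec_stats_chaoticmvt
  rw [pv_A_char, pv_B_char]
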